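-- pv_equiv track=rewrite | github.com/LeeLawLam/331-as-8 | a8p1.py | getSubsequences
-- ===== SOURCE A (Python) =====
-- def getSubsequences(ciphertext: str, keylen: int):
--     # This function takes in a ciphertext as a string and a key length as a int for its parameters
--     # This function will return list of lists containing the characters in each subsequence
--     subsequences = []
--
--     for i in range(keylen):
--         subsequence = []
--         for j in range(i, len(ciphertext), keylen):
--             subsequence.append(ciphertext[j])
--         subsequences.append(subsequence)
--
--     return subsequences
-- ===== SOURCE B (Python) =====
-- def getSubsequences(ciphertext: str, keylen: int):
--     # Single row-major pass: distribute each character into its bucket by index mod keylen.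
--     buckets = [[] for _ in range(keylen)]
--     if keylen <= 0:
--         return buckets
--     for idx, ch in enumerate(ciphertext):
--         buckets[idx % keylen].append(ch)
--     return buckets
-- ===== Notes on version B (the rewrite author's own statement) =====
-- stated objective: alternative
-- what changed: Replaces A's column-major nested loops (one strided index scan per subsequence) by a single row-major pass that distributes each character into buckets[idx % keylen].
import Mathlib
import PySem

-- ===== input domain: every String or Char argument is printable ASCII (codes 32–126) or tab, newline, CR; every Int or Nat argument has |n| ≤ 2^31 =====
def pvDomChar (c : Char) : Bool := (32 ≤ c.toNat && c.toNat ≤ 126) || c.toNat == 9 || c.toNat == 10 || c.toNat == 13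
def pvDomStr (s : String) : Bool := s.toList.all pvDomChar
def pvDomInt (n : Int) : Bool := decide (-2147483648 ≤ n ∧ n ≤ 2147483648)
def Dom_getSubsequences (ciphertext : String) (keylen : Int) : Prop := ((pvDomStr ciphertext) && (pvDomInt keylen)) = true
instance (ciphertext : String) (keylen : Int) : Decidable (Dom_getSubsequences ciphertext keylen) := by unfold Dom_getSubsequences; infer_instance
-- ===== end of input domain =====

-- B replaces A's column-major nested loops by a single row-major bucket-distribution pass (alternative decomposition, same cost).


-- ===== PORT A =====
-- ciphertext[j] is always in range here (j ∈ range(i, len, keylen)), so the `.getD ""` (IndexError) branch never fires.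
def getSubsequences (ciphertext : String) (keylen : Int) : List (List String) :=
  (PySem.List.pyRange 0 keylen 1).foldl
    (fun subsequences i =>
      subsequences ++
        [(PySem.List.pyRange i (PySem.Str.len ciphertext) keylen).foldl
          (fun subsequence j =>
            subsequence ++ [((PySem.Str.pyGet? ciphertext j).map String.singleton).getD ""])
          []])
    []

-- ===== PORT B =====
-- idx % keylen is nonnegative in the loop branch (keylen > 0, idx ≥ 0), so `.toNat` is exact there.
def getSubsequences_alt (ciphertext : String) (keylen : Int) : List (List String) :=
  let buckets : List (List String) := (PySem.List.pyRange 0 keylen 1).map (fun _ => [])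
  if keylen ≤ 0 then buckets
  else
    (PySem.List.enumerate ciphertext.toList).foldl
      (fun bs p => bs.modify (PySem.Int.mod p.1 keylen).toNat (fun b => b ++ [String.singleton p.2]))
      buckets

-- ===== PRECONDITION & SPEC =====
def Spec_getSubsequences (ciphertext : String) (keylen : Int) (out : List (List String)) : Prop := out = getSubsequences_alt ciphertext keylen
instance (ciphertext : String) (keylen : Int) (out : List (List String)) : Decidable (Spec_getSubsequences ciphertext keylen out) := by unfold Spec_getSubsequences; infer_instance

-- ===== CLAIM (what is proved, stated in full; the proofs are below) =====
def Claim_equal_getSubsequences : Prop := ∀ (ciphertext : String) (keylen : Int), Dom_getSubsequences ciphertext keylen → Spec_getSubsequences ciphertext keylen (getSubsequences ciphertext keylen)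

-- ===== LEMMAS AND PROOFS =====

-- the characters of cs (first position t) whose absolute position is ≡ i (mod k), in order
def pvPick (k : Nat) : List Char → Nat → Nat → List String
  | [], _, _ => []
  | c :: cs, t, i => (if t % k = i then [String.singleton c] else []) ++ pvPick k cs (t + 1) i

theorem pvPick_eq_filter (k : Nat) (cs : List Char) (t i : Nat) :
    pvPick k cs t i
      = ((List.range cs.length).filter (fun p => (t + p) % k == i)).map
          (fun p => String.singleton (cs.getD p ' ')) := by
  induction cs generalizing t with
  | nil => simp [pvPick]
  | cons c cs ih =>
    have hpred : ((fun p => (t + p) % k == i) ∘ Nat.succ) = (fun p => (t + 1 + p) % k == i) := by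
      funext p
      have h : t + (p + 1) = t + 1 + p := by omega
      simp [Function.comp, Nat.succ_eq_add_one, h]
    simp only [pvPick, List.length_cons, List.range_succ_eq_map, List.filter_cons,
      List.filter_map, hpred, ih (t + 1)]
    by_cases h : t % k = i
    · simp [h, Function.comp, Nat.succ_eq_add_one]
    · simp [h, Function.comp, Nat.succ_eq_add_one]

theorem pvFoldB_length (k : Int) (l : List (Int × Char)) (bs : List (List String)) :
    (l.foldl (fun bs p => bs.modify (PySem.Int.mod p.1 k).toNat (fun b => b ++ [String.singleton p.2])) bs).length
      = bs.length := by
  induction l generalizing bs with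
  | nil => rfl
  | cons p l ih => simp [List.foldl_cons, ih, List.length_modify]

theorem pvFoldB_get (k : Int) (hk : 0 < k) (cs : List Char) (t : Nat) (bs : List (List String))
    (i : Nat) (hi : i < bs.length) :
    ((PySem.List.enumerate cs (t : Int)).foldl
        (fun bs p => bs.modify (PySem.Int.mod p.1 k).toNat (fun b => b ++ [String.singleton p.2])) bs)[i]?
      = some (bs[i] ++ pvPick k.toNat cs t i) := by
  induction cs generalizing t bs with
  | nil => simp [pvPick, List.getElem?_eq_getElem hi]
  | cons c cs ih =>
    rw [PySem.List.enumerate_cons, List.foldl_cons]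
    have hcast : (t : Int) + 1 = ((t + 1 : Nat) : Int) := by push_cast; ring
    have hmod : (PySem.Int.mod (t : Int) k).toNat = t % k.toNat := by
      have hknat : (k : Int) = (k.toNat : Int) := (Int.toNat_of_nonneg hk.le).symm
      rw [hknat, PySem.Int.mod_natCast]; exact Int.toNat_natCast _
    rw [hcast, ih (t + 1) _ (by rw [List.length_modify]; exact hi)]
    rw [List.getElem_modify, hmod]
    by_cases h : t % k.toNat = i
    · simp [h, pvPick]
    · simp [h, pvPick]

theorem pvPyRange_filter (k : Int) (hk : 0 < k) (i n : Nat) (hik : (i : Int) < k) :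
    PySem.List.pyRange (i : Int) (n : Int) k
      = ((List.range n).filter (fun p => p % k.toNat == i)).map (Nat.cast : Nat → Int) := by
  have hknat : (k : Int) = (k.toNat : Int) := (Int.toNat_of_nonneg hk.le).symm
  have hik' : i < k.toNat := by omega
  have hL : (PySem.List.pyRange (i : Int) (n : Int) k).Pairwise (· < ·) := by
    rw [PySem.List.pyRange_of_pos _ _ hk]
    refine List.Pairwise.map _ ?_ List.pairwise_lt_range
    intro a b hab
    have hab' : (a : Int) < b := by exact_mod_cast hab
    nlinarith
  have hR : (((List.range n).filter (fun p => p % k.toNat == i)).map (Nat.cast : Nat → Int)).Pairwise (· < ·) := by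
    refine List.Pairwise.map _ ?_ (List.Pairwise.filter _ List.pairwise_lt_range)
    intro a b hab; exact_mod_cast hab
  have hmem : ∀ x, x ∈ PySem.List.pyRange (i : Int) (n : Int) k ↔
      x ∈ ((List.range n).filter (fun p => p % k.toNat == i)).map (Nat.cast : Nat → Int) := by
    intro x
    rw [PySem.List.mem_pyRange_iff_of_pos hk]
    simp only [List.mem_map, List.mem_filter, List.mem_range, beq_iff_eq]
    constructor
    · rintro ⟨h1, h2, q, hq⟩
      have hq0 : 0 ≤ q := by nlinarith
      have e1 : (q.toNat : Int) = q := Int.toNat_of_nonneg hq0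
      have e2 : (x.toNat : Int) = x := Int.toNat_of_nonneg (by omega)
      have hx : x.toNat = i + k.toNat * q.toNat := by
        have : ((x.toNat : Nat) : Int) = ((i + k.toNat * q.toNat : Nat) : Int) := by
          push_cast
          rw [e2, e1, ← hknat]
          linarith
        exact_mod_cast this
      refine ⟨x.toNat, ⟨by omega, ?_⟩, by exact_mod_cast e2⟩
      rw [hx, Nat.add_mul_mod_self_left]
      exact Nat.mod_eq_of_lt hik'
    · rintro ⟨p, ⟨hpn, hpmod⟩, rfl⟩
      have hdm := Nat.div_add_mod p k.toNat
      have hle := Nat.mod_le p k.toNat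
      refine ⟨by omega, by omega, ⟨(p / k.toNat : Nat), ?_⟩⟩
      have hcast : ((p : Nat) : Int) = (k.toNat : Int) * ((p / k.toNat : Nat) : Int) + (i : Int) := by
        exact_mod_cast congrArg (fun m : Nat => (m : Int)) (hpmod ▸ hdm).symm
      rw [← hknat] at hcast
      linarith
  have hnodupL : (PySem.List.pyRange (i : Int) (n : Int) k).Nodup := hL.imp ne_of_lt
  have hnodupR : (((List.range n).filter (fun p => p % k.toNat == i)).map (Nat.cast : Nat → Int)).Nodup :=
    hR.imp ne_of_lt
  exact ((List.perm_ext_iff_of_nodup hnodupL hnodupR).mpr hmem).eq_of_pairwise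
    (fun a b _ _ h1 h2 => absurd h2 (lt_asymm h1)) hL hR

-- ===== VERDICT (by name: the statement is the Claim_ definition above) =====
theorem getSubsequences_spec : Claim_equal_getSubsequences := by
  intro s k _
  unfold Spec_getSubsequences getSubsequences getSubsequences_alt
  by_cases hk : k ≤ 0
  · simp [hk, PySem.List.pyRange_one_eq_nil hk]
  · replace hk : 0 < k := lt_of_not_ge hk
    simp only [if_neg (not_le.mpr hk)]
    rw [PySem.List.foldl_append_singleton_eq_map
      (f := fun i => (PySem.List.pyRange i (PySem.Str.len s) k).foldl
        (fun subsequence j => subsequence ++ [((PySem.Str.pyGet? s j).map String.singleton).getD ""]) [])]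
    rw [List.nil_append]
    have hlenb : ((PySem.List.pyRange 0 k 1).map (fun _ => ([] : List String))).length = k.toNat := by
      simp [PySem.List.length_pyRange_one]
    apply List.ext_getElem?
    intro i
    by_cases hikn : i < k.toNat
    · have hiA : i < ((PySem.List.pyRange 0 k 1).map (fun i =>
          (PySem.List.pyRange i (PySem.Str.len s) k).foldl
            (fun subsequence j => subsequence ++ [((PySem.Str.pyGet? s j).map String.singleton).getD ""]) [])).length := by
        simp [PySem.List.length_pyRange_one]; omega
      rw [List.getElem?_eq_getElem hiA]
      have hB := pvFoldB_get k hk s.toList 0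
        ((PySem.List.pyRange 0 k 1).map (fun _ => ([] : List String))) i (by rw [hlenb]; exact hikn)
      rw [show ((0 : Nat) : Int) = (0 : Int) from rfl] at hB
      rw [hB]
      congr 1
      rw [List.getElem_map, PySem.List.getElem_pyRange_one, zero_add]
      have hb : ((PySem.List.pyRange 0 k 1).map (fun _ => ([] : List String)))[i]'(by rw [hlenb]; exact hikn) = [] := by
        simp
      rw [hb, List.nil_append]
      rw [PySem.List.foldl_append_singleton_eq_map
        (f := fun j => ((PySem.Str.pyGet? s j).map String.singleton).getD ""), List.nil_append]
      have hlen : PySem.Str.len s = (s.toList.length : Int) := by simp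
      rw [hlen, pvPyRange_filter k hk i s.toList.length (by omega), List.map_map]
      rw [pvPick_eq_filter]
      simp only [Nat.zero_add]
      apply List.map_congr_left
      intro p hp
      have hpn : p < s.toList.length := by
        have := List.mem_range.mp (List.mem_of_mem_filter hp)
        exact this
      simp [Function.comp, List.getD_eq_getElem?_getD, List.getElem?_eq_getElem hpn]
    · rw [List.getElem?_eq_none, List.getElem?_eq_none]
      · rw [pvFoldB_length, hlenb]; omega
      · simp [PySem.List.length_pyRange_one]; omega
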